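-- pv_equiv track=rewrite | github.com/abzb1/Codility-Lessons-Python | Lesson_13_Fibonacci_numbers/Ladder.py | solution
-- ===== SOURCE A (Python) =====
-- def solution(A, B):
--     max_rungs = max(A)  # Find the maximum number of rungs we need to calculate for
--
--     # Fibonacci-like sequence with modulo calculations
--     fib = [0] * (max(3, max_rungs + 1))  # Store results for each rung
--     fib[1] = 1
--     fib[2] = 2
--
--     for i in range(3, max_rungs + 1):
--         fib[i] = (fib[i - 1] + fib[i - 2]) % (2**30)  # Optimized modulo calculation
--
--     # Prepare the results
--     results = [fib[rungs] % (2**power) for rungs, power in zip(A, B)]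
--     return results
-- ===== SOURCE B (Python) =====
-- def _fib_pair(n):
--     # (F(n) % 2**30, F(n+1) % 2**30) for standard Fibonacci F(0)=0, F(1)=1,
--     # computed by fast doubling: F(2k) = F(k)*(2F(k+1)-F(k)), F(2k+1) = F(k)^2 + F(k+1)^2
--     if n == 0:
--         return (0, 1)
--     a, b = _fib_pair(n >> 1)
--     c = a * (2 * b - a) % (2 ** 30)
--     d = (a * a + b * b) % (2 ** 30)
--     if n & 1:
--         return (d, (c + d) % (2 ** 30))
--     return (c, d)
--
-- def solution(A, B):
--     # fib[r] = F(r+1) mod 2**30 for r >= 1 and fib[r] = 0 for r <= 0, so answer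
--     # each query directly by fast doubling, never building a table.
--     return [(_fib_pair(r)[1] if r > 0 else 0) % (2 ** p) for r, p in zip(A, B)]
-- ===== Notes on version B (the rewrite author's own statement) =====
-- stated objective: alternative
-- what changed: B drops A's iterative fib table of size max(A) entirely and answers each query independently by fast-doubling Fibonacci (F(2k)=F(k)(2F(k+1)-F(k)), F(2k+1)=F(k)^2+F(k+1)^2) mod 2^30; it trades the shared table for O(log rung) arithmetic per query.
-- outside the precondition, e.g. on solution([-1], [3]): A returns [2], B returns [0]; on solution([1], [-1]): A returns [0.0], B returns [0.0]
import Mathlib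
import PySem

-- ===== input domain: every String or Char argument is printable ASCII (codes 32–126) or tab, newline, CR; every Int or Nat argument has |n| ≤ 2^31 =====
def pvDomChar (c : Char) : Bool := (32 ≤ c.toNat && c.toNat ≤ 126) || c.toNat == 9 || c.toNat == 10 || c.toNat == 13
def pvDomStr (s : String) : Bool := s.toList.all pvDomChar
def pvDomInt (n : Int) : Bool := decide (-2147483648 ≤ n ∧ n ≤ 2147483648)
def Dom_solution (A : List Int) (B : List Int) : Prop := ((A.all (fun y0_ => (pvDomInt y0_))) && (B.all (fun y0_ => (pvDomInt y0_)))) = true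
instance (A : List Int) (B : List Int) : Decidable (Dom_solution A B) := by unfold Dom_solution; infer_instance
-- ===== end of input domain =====

-- B answers each query independently by fast-doubling Fibonacci mod 2^30, with no
-- table of size max(A) at all (objective: alternative — it trades A's shared table
-- for per-query doubling arithmetic).

-- ===== PORT A =====
def solution (A : List Int) (B : List Int) : List Int :=
  let max_rungs := (PySem.List.max? A (fun x => x)).getD 0
  let fib0 : List Int := List.replicate (max 3 (max_rungs + 1)).toNat 0
  let fib1 := fib0.set 1 1
  let fib2 := fib1.set 2 2
  let fib := (PySem.List.pyRange 3 (max_rungs + 1) 1).foldl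
      (fun f i =>
        f.set i.toNat (PySem.Int.mod (f.getD (i - 1).toNat 0 + f.getD (i - 2).toNat 0) (2 ^ 30)))
      fib2
  (A.zip B).map (fun rp => PySem.Int.mod ((PySem.List.pyGet? fib rp.1).getD 0) (2 ^ rp.2.toNat))

-- ===== PORT B =====
-- _fib_pair(n) of Source B: (F(n) % 2^30, F(n+1) % 2^30) by fast doubling.
-- Recursion argument: Source B only calls _fib_pair on a rung r > 0, so Python's n >> 1
-- is exactly the Nat division n / 2 here.
def fibPairB : Nat → Int × Int
  | 0 => (0, 1)
  | (n + 1) =>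
      let p := fibPairB ((n + 1) / 2)
      let c := PySem.Int.mod (p.1 * (2 * p.2 - p.1)) (2 ^ 30)
      let d := PySem.Int.mod (p.1 * p.1 + p.2 * p.2) (2 ^ 30)
      if (n + 1) % 2 = 1 then (d, PySem.Int.mod (c + d) (2 ^ 30)) else (c, d)

def solution_alt (A : List Int) (B : List Int) : List Int :=
  (A.zip B).map (fun rp =>
    PySem.Int.mod (if 0 < rp.1 then (fibPairB rp.1.toNat).2 else 0) (2 ^ rp.2.toNat))

-- ===== PRECONDITION & SPEC =====
-- Pre_ excludes: empty A (A raises ValueError from max; B returns []); queried pairs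
-- with a negative rung count — outside the ladder problem's domain: A either raises
-- IndexError (deep negatives) or reads the table through Python's negative indexing
-- while B returns 0, two equally unspecified corner behaviours; and queried pairs with
-- a negative power, where both programs' 2**power is a float, so neither result is a
-- list of ints.
def Pre_solution (A : List Int) (B : List Int) : Prop :=
  A ≠ [] ∧ ∀ rp ∈ A.zip B, 0 ≤ rp.1 ∧ 0 ≤ rp.2
instance (A : List Int) (B : List Int) : Decidable (Pre_solution A B) := by
  unfold Pre_solution; infer_instance
def pvWitness_solution : List Int × List Int := ([4, 2, 7], [5, 30, 3])

def Spec_solution (A : List Int) (B : List Int) (out : List Int) : Prop := out = solution_alt A B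
instance (A : List Int) (B : List Int) (out : List Int) : Decidable (Spec_solution A B out) := by
  unfold Spec_solution; infer_instance

-- ===== CLAIM (what is proved, stated in full; the proofs are below) =====
def Claim_equal_solution : Prop := ∀ (A : List Int) (B : List Int), Dom_solution A B → Pre_solution A B → Spec_solution A B (solution A B)

-- ===== LEMMAS AND PROOFS =====

-- the sequence A tabulates: fib[0]=0, fib[1]=1, fib[2]=2, then mod-2^30 sums
def fibv : Nat → Int
  | 0 => 0
  | 1 => 1
  | 2 => 2
  | n + 3 => PySem.Int.mod (fibv (n + 2) + fibv (n + 1)) (2 ^ 30)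

-- A's table-filling step and table, exactly as the port folds them
def pvStepA (f : List Int) (i : Int) : List Int :=
  f.set i.toNat (PySem.Int.mod (f.getD (i - 1).toNat 0 + f.getD (i - 2).toNat 0) (2 ^ 30))

def pvBase (L : Nat) : List Int := ((List.replicate L (0 : Int)).set 1 1).set 2 2

def pvTableAux (L k : Nat) : List Int :=
  (PySem.List.pyRange 3 (3 + (k : Int)) 1).foldl pvStepA (pvBase L)

theorem pvTableAux_zero (L : Nat) : pvTableAux L 0 = pvBase L := by
  unfold pvTableAux
  rw [show (3 + ((0 : Nat) : Int)) = 3 by norm_num, PySem.List.pyRange_one_eq_nil (by omega)]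
  rfl

theorem pvTableAux_succ (L k : Nat) :
    pvTableAux L (k + 1) = pvStepA (pvTableAux L k) (3 + (k : Int)) := by
  unfold pvTableAux
  rw [show (3 + (((k : Nat) + 1 : Nat) : Int)) = (3 + (k : Int)) + 1 by push_cast; ring,
    PySem.List.pyRange_one_succ_right (by omega), List.foldl_append]
  rfl

theorem pvTableAux_inv (L : Nat) (hL3 : 3 ≤ L) :
    ∀ k : Nat, 3 + k ≤ L →
      (pvTableAux L k).length = L ∧ ∀ j : Nat, j < 3 + k → (pvTableAux L k).getD j 0 = fibv j := by
  intro k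
  induction k with
  | zero =>
    intro _
    rw [pvTableAux_zero]
    refine ⟨by simp [pvBase], ?_⟩
    intro j hj
    interval_cases j <;>
      simp [pvBase, fibv, List.getD_eq_getElem?_getD,
        show (0 : Nat) < L by omega, show 1 < L by omega, show 2 < L by omega]
  | succ k ih =>
    intro hk
    obtain ⟨ihlen, ihval⟩ := ih (by omega)
    rw [pvTableAux_succ]
    unfold pvStepA
    have htn : ((3 : Int) + (k : Int)).toNat = 3 + k := by omega
    have htn1 : ((3 : Int) + (k : Int) - 1).toNat = 2 + k := by omega
    have htn2 : ((3 : Int) + (k : Int) - 2).toNat = 1 + k := by omega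
    rw [htn, htn1, htn2, ihval (2 + k) (by omega), ihval (1 + k) (by omega)]
    refine ⟨by simpa using ihlen, ?_⟩
    intro j hj
    rw [List.getD_eq_getElem?_getD, List.getElem?_set]
    by_cases hje : 3 + k = j
    · subst hje
      rw [if_pos rfl, if_pos (by omega)]
      show PySem.Int.mod (fibv (2 + k) + fibv (1 + k)) (2 ^ 30) = fibv (3 + k)
      rw [show 3 + k = k + 3 by omega, show 2 + k = k + 2 by omega, show 1 + k = k + 1 by omega]
      rfl
    · rw [if_neg hje, ← List.getD_eq_getElem?_getD]
      exact ihval j (by omega)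

theorem pvTable_getD (m r : Int) (hr0 : 0 ≤ r) (hrm : r ≤ m) :
    (PySem.List.pyGet?
      ((PySem.List.pyRange 3 (m + 1) 1).foldl pvStepA (pvBase (max 3 (m + 1)).toNat)) r).getD 0
      = fibv r.toNat := by
  have hm0 : 0 ≤ m := le_trans hr0 hrm
  have hL3 : 3 ≤ (max 3 (m + 1)).toNat := by omega
  by_cases hm2 : 2 ≤ m
  · have hrng : PySem.List.pyRange 3 (m + 1) 1 = PySem.List.pyRange 3 (3 + ((m - 2).toNat : Int)) 1 := by
      congr 1
      omega
    obtain ⟨hlen, hval⟩ := pvTableAux_inv (max 3 (m + 1)).toNat hL3 (m - 2).toNat (by omega)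
    rw [hrng]
    show (PySem.List.pyGet? (pvTableAux (max 3 (m + 1)).toNat (m - 2).toNat) r).getD 0 = fibv r.toNat
    rw [PySem.List.pyGet?_of_nonneg _ hr0,
      List.getElem?_eq_getElem (by rw [hlen]; omega)]
    have := hval r.toNat (by omega)
    rw [List.getD_eq_getElem?_getD, List.getElem?_eq_getElem (by rw [hlen]; omega)] at this
    exact this
  · have hrng : PySem.List.pyRange 3 (m + 1) 1 = PySem.List.pyRange 3 (3 + ((0 : Nat) : Int)) 1 := by
      rw [PySem.List.pyRange_one_eq_nil (by omega), PySem.List.pyRange_one_eq_nil (by norm_num)]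
    obtain ⟨hlen, hval⟩ := pvTableAux_inv (max 3 (m + 1)).toNat hL3 0 (by omega)
    rw [hrng]
    show (PySem.List.pyGet? (pvTableAux (max 3 (m + 1)).toNat 0) r).getD 0 = fibv r.toNat
    rw [PySem.List.pyGet?_of_nonneg _ hr0,
      List.getElem?_eq_getElem (by rw [hlen]; omega)]
    have := hval r.toNat (by omega)
    rw [List.getD_eq_getElem?_getD, List.getElem?_eq_getElem (by rw [hlen]; omega)] at this
    exact this

-- B side: fast doubling computes the standard Fibonacci pair mod 2^30
theorem fib_cast_two_mul (k : Nat) :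
    (Nat.fib (2 * k) : Int) = (Nat.fib k : Int) * (2 * (Nat.fib (k+1) : Int) - (Nat.fib k : Int)) := by
  have hle : Nat.fib k ≤ 2 * Nat.fib (k + 1) := by
    have := Nat.fib_le_fib_succ (n := k); omega
  rw [Nat.fib_two_mul]
  push_cast [hle]
  ring

theorem fibPairB_eq (n : Nat) :
    fibPairB n = (((Nat.fib n % 2 ^ 30 : Nat) : Int), ((Nat.fib (n + 1) % 2 ^ 30 : Nat) : Int)) := by
  induction n using Nat.strong_induction_on with
  | _ n ih =>
    match n with
    | 0 => simp [fibPairB]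
    | (m + 1) =>
      have h := ih ((m + 1) / 2) (by omega)
      have hM : (0:Int) < 2^30 := by norm_num
      rw [fibPairB, h]
      simp only [PySem.Int.mod_eq_emod_of_pos hM, Int.natCast_mod, Nat.cast_pow, Nat.cast_ofNat]
      set k := (m+1)/2 with hk
      have ha : ((Nat.fib k : Int) % 2^30) ≡ (Nat.fib k : Int) [ZMOD (2^30)] :=
        Int.emod_emod_of_dvd _ dvd_rfl
      have hb : ((Nat.fib (k+1) : Int) % 2^30) ≡ (Nat.fib (k+1) : Int) [ZMOD (2^30)] :=
        Int.emod_emod_of_dvd _ dvd_rfl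
      have hc : ((Nat.fib k : Int) % 2^30) * (2 * ((Nat.fib (k+1) : Int) % 2^30) - (Nat.fib k : Int) % 2^30) % 2^30
          = (Nat.fib (2*k) : Int) % 2^30 := by
        have := (ha.mul ((hb.mul_left 2).sub ha))
        rw [fib_cast_two_mul]
        exact this
      have hd : (((Nat.fib k : Int) % 2^30) * ((Nat.fib k : Int) % 2^30) + ((Nat.fib (k+1) : Int) % 2^30) * ((Nat.fib (k+1) : Int) % 2^30)) % 2^30
          = (Nat.fib (2*k+1) : Int) % 2^30 := by
        have := ((ha.mul ha).add (hb.mul hb))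
        rw [Nat.fib_two_mul_add_one]
        push_cast
        rw [show ((Nat.fib (k+1) : Int))^2 + ((Nat.fib k : Int))^2
            = (Nat.fib k : Int) * (Nat.fib k : Int) + (Nat.fib (k+1) : Int) * (Nat.fib (k+1) : Int) by ring]
        exact this
      rcases Nat.even_or_odd (m+1) with he | ho
      · have hmk : m + 1 = 2 * k := by rcases he with ⟨t, ht⟩; omega
        have hpar : ¬ ((m+1) % 2 = 1) := by omega
        simp only [if_neg hpar]
        rw [Prod.mk.injEq]
        constructor
        · rw [hc, hmk]
        · rw [hd, show m + 1 + 1 = 2*k+1 by omega]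
      · have hmk : m + 1 = 2 * k + 1 := by rcases ho with ⟨t, ht⟩; omega
        have hpar : (m+1) % 2 = 1 := by omega
        simp only [if_pos hpar]
        rw [Prod.mk.injEq]
        constructor
        · rw [hd, hmk]
        · rw [hc, hd, show m + 1 + 1 = 2*k + 2 by omega]
          have hx : ((Nat.fib (2*k) : Int) % 2^30) ≡ (Nat.fib (2*k) : Int) [ZMOD (2^30)] :=
            Int.emod_emod_of_dvd _ dvd_rfl
          have hy : ((Nat.fib (2*k+1) : Int) % 2^30) ≡ (Nat.fib (2*k+1) : Int) [ZMOD (2^30)] :=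
            Int.emod_emod_of_dvd _ dvd_rfl
          have := hx.add hy
          rw [Nat.fib_add_two]
          push_cast
          exact this

-- the two sequences agree from index 1 on
theorem fibv_eq : (n : Nat) → 1 ≤ n → fibv n = ((Nat.fib (n + 1) % 2 ^ 30 : Nat) : Int)
  | 1, _ => by norm_num [fibv]
  | 2, _ => by norm_num [fibv]
  | (n + 3), _ => by
      have h1 := fibv_eq (n + 1) (by omega)
      have h2 := fibv_eq (n + 2) (by omega)
      have hM : (0:Int) < 2^30 := by norm_num
      show PySem.Int.mod (fibv (n + 2) + fibv (n + 1)) (2 ^ 30) = _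
      rw [h1, h2, PySem.Int.mod_eq_emod_of_pos hM]
      have : (Nat.fib (n + 3) % 2 ^ 30 + Nat.fib (n + 2) % 2 ^ 30) % 2 ^ 30
          = Nat.fib (n + 3 + 1) % 2 ^ 30 := by
        rw [← Nat.add_mod]
        conv_rhs => rw [show n + 3 + 1 = (n + 2) + 2 by omega, Nat.fib_add_two]
        rw [Nat.add_comm]
      exact_mod_cast congrArg (fun x : Nat => (x : Int)) this

-- ===== VERDICT (by name: the statement is the Claim_ definition above) =====
theorem solution_spec : Claim_equal_solution := by
  intro A B hdom hpre
  obtain ⟨hA, hzip⟩ := hpre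
  unfold Spec_solution solution solution_alt
  obtain ⟨m, hm⟩ : ∃ m, PySem.List.max? A (fun x => x) = some m := by
    cases ho : PySem.List.max? A (fun x => x) with
    | none => exact absurd ((PySem.List.max?_eq_none_iff A fun x => x).mp ho) hA
    | some m => exact ⟨m, rfl⟩
  have hle : ∀ x ∈ A, x ≤ m := PySem.List.max?_isMax hm
  rw [hm]
  simp only [Option.getD_some]
  apply List.map_congr_left
  intro rp hrp
  obtain ⟨hr0, hp0⟩ := hzip rp hrp
  have hrm : rp.1 ≤ m := hle _ (List.of_mem_zip hrp).1
  show PySem.Int.mod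
      ((PySem.List.pyGet?
        ((PySem.List.pyRange 3 (m + 1) 1).foldl pvStepA (pvBase (max 3 (m + 1)).toNat)) rp.1).getD 0)
      (2 ^ rp.2.toNat)
    = PySem.Int.mod (if 0 < rp.1 then (fibPairB rp.1.toNat).2 else 0) (2 ^ rp.2.toNat)
  rw [pvTable_getD m rp.1 hr0 hrm]
  by_cases hz : 0 < rp.1
  · rw [if_pos hz, fibPairB_eq, fibv_eq rp.1.toNat (by omega)]
  · rw [if_neg hz, show rp.1 = 0 by omega]
    rfl
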